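-- pv_equiv track=rewrite | github.com/MorElf7/search-engine | tokenization.py | isShortWord
-- ===== SOURCE A (Python) =====
-- vowels = "aeoiu"
--
-- def isShortWord(stem : str) -> bool:
--     flag = False
--     count = 0
--     for i in range(len(stem)):
--         if stem[i] in vowels:
--             flag = True
--         else:
--             if flag:
--                 count += 1
--             flag = False
--     return count == 1
-- ===== SOURCE B (Python) =====
-- from itertools import groupby
--
-- vowels = "aeoiu"
--
-- def isShortWord(stem: str) -> bool:
--     # Run-length compress the vowel/consonant pattern; a VC sequence is a
--     # vowel run that is followed by something, i.e. any vowel run except a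
--     # trailing one.
--     keys = [k for k, _ in groupby(ch in vowels for ch in stem)]
--     runs = keys.count(True)
--     if keys and keys[-1]:
--         runs -= 1
--     return runs == 1
-- ===== Notes on version B (the rewrite author's own statement) =====
-- stated objective: idiomatic
-- what changed: Replaces A's per-character flag/counter state machine with run-length compression: groupby collapses the vowel/consonant pattern into runs, and the answer is whether the number of vowel runs, discounting a trailing vowel run, equals 1.
import Mathlib
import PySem

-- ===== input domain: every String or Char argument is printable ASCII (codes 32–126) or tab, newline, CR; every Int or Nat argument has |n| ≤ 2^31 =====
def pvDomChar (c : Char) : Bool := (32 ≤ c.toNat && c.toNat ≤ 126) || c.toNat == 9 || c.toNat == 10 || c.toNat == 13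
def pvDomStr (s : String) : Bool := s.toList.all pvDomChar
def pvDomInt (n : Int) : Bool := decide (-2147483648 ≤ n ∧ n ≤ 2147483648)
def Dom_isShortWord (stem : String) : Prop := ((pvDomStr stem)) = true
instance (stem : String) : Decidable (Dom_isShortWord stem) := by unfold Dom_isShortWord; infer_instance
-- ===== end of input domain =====

-- B replaces A's flag/counter state machine with run-length compression: count vowel runs, discounting a trailing one (idiomatic; same cost).

-- vowels = "aeoiu"
def pvVowels : List Char := "aeoiu".toList

-- ===== PORT A =====
-- the loop body: state (flag, count), one character stem[i] per index
def isShortWordStep (st : Bool × Int) (c : Char) : Bool × Int :=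
  if pvVowels.contains c then (true, st.2)
  else (false, if st.1 then st.2 + 1 else st.2)

def isShortWord (stem : String) : Bool :=
  let r := stem.toList.foldl isShortWordStep (false, 0)
  r.2 == 1

-- ===== PORT B =====
-- [k for k, _ in groupby(bs)] : the keys of the maximal runs = adjacent dedup
def dedupAdj : List Bool → List Bool
  | [] => []
  | [a] => [a]
  | a :: b :: rest => if a == b then dedupAdj (b :: rest) else a :: dedupAdj (b :: rest)

def isShortWord_alt (stem : String) : Bool :=
  let keys := dedupAdj (stem.toList.map (fun c => pvVowels.contains c))
  let runs : Int := (keys.count true : Int) - (if keys.getLast? = some true then 1 else 0)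
  runs == 1

-- ===== PRECONDITION & SPEC =====
def Spec_isShortWord (stem : String) (out : Bool) : Prop := out = isShortWord_alt stem
instance (stem : String) (out : Bool) : Decidable (Spec_isShortWord stem out) := by unfold Spec_isShortWord; infer_instance

-- ===== CLAIM (what is proved, stated in full; the proofs are below) =====
def Claim_equal_isShortWord : Prop := ∀ (stem : String), Dom_isShortWord stem → Spec_isShortWord stem (isShortWord stem)

-- ===== LEMMAS AND PROOFS =====

-- number of true→false transitions in a Bool list
def transB : List Bool → Int
  | a :: b :: r => (if a && !b then 1 else 0) + transB (b :: r)
  | _ => 0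

lemma isShortWord_foldl_snd (l : List Char) (flag : Bool) (count : Int) :
    (l.foldl isShortWordStep (flag, count)).2 =
      count + transB (flag :: l.map (pvVowels.contains ·)) := by
  induction l generalizing flag count with
  | nil => simp [transB]
  | cons c cs ih =>
    simp only [List.foldl_cons, List.map_cons, isShortWordStep]
    by_cases hv : c ∈ pvVowels
    · simp [hv, ih, transB]
    · cases flag <;> simp [hv, ih, transB] <;> omega

lemma dedupAdj_ne_nil (a : Bool) (l : List Bool) : dedupAdj (a :: l) ≠ [] := by
  induction l generalizing a with
  | nil => simp [dedupAdj]
  | cons b r ih =>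
    simp only [dedupAdj]
    split
    · exact ih b
    · simp

lemma transB_eq_runs (l : List Bool) :
    transB l = ((dedupAdj l).count true : Int)
      - (if (dedupAdj l).getLast? = some true then 1 else 0) := by
  induction l with
  | nil => simp [transB, dedupAdj]
  | cons a l ih =>
    cases l with
    | nil => cases a <;> simp [transB, dedupAdj]
    | cons b r =>
      simp only [transB, dedupAdj]
      by_cases hab : a = b
      · subst hab
        simp [ih]
      · have hne : dedupAdj (b :: r) ≠ [] := dedupAdj_ne_nil b r
        have hb : (a == b) = false := by simpa using hab
        simp only [hb, Bool.false_eq_true, if_false]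
        cases h : dedupAdj (b :: r) with
        | nil => exact absurd h hne
        | cons x xs =>
          simp only [List.count_cons, List.getLast?_cons_cons, h] at ih ⊢
          rw [ih]
          cases a <;> cases b <;> simp_all <;> omega

lemma transB_false_cons (l : List Bool) : transB (false :: l) = transB l := by
  cases l <;> simp [transB]

-- ===== VERDICT (by name: the statement is the Claim_ definition above) =====
theorem isShortWord_spec : Claim_equal_isShortWord := by
  intro stem _
  unfold Spec_isShortWord isShortWord isShortWord_alt
  simp only []
  rw [isShortWord_foldl_snd, transB_false_cons, transB_eq_runs]
  simp
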